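-- pv_equiv track=rewrite | github.com/RALaBarge/bluTruth | blutruth/correlation/engine.py | _cluster_events
-- ===== SOURCE A (Python) =====
-- from typing import Any, Dict, List, Optional
--
-- def _cluster_events(
--     sorted_events: List[Dict[str, Any]], window_us: int
-- ) -> List[List[Dict[str, Any]]]:
--     """Group time-proximate events into clusters."""
--     if not sorted_events:
--         return []
--
--     clusters = []
--     current_cluster = [sorted_events[0]]
--
--     for ev in sorted_events[1:]:
--         # Check if this event is within window of the last event in cluster
--         if ev["ts_mono_us"] - current_cluster[-1]["ts_mono_us"] <= window_us:
--             current_cluster.append(ev)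
--         else:
--             if len(current_cluster) >= 2:
--                 clusters.append(current_cluster)
--             current_cluster = [ev]
--
--     if len(current_cluster) >= 2:
--         clusters.append(current_cluster)
--
--     return clusters
-- ===== SOURCE B (Python) =====
-- from typing import Any, Dict, List
--
--
-- def _cluster_events(
--     sorted_events: List[Dict[str, Any]], window_us: int
-- ) -> List[List[Dict[str, Any]]]:
--     """Two-phase by indices: collect the cut positions where a consecutive gap
--     exceeds the window, then slice the list between consecutive cuts and keep
--     slices of size >= 2."""
--     n = len(sorted_events)
--     cuts = [0] + [i for i in range(1, n)
--                   if sorted_events[i]["ts_mono_us"] - sorted_events[i - 1]["ts_mono_us"] > window_us] + [n]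
--     return [sorted_events[a:b] for a, b in zip(cuts, cuts[1:]) if b - a >= 2]
-- ===== Notes on version B (the rewrite author's own statement) =====
-- stated objective: alternative
-- what changed: B replaces A's single fused scan carrying a current-cluster accumulator with an index-based two-phase algorithm: phase 1 computes the list of cut positions (indices where the consecutive gap exceeds window_us), phase 2 slices the input between consecutive cuts and keeps slices of length >= 2; no cluster is ever built incrementally.
import Mathlib
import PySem

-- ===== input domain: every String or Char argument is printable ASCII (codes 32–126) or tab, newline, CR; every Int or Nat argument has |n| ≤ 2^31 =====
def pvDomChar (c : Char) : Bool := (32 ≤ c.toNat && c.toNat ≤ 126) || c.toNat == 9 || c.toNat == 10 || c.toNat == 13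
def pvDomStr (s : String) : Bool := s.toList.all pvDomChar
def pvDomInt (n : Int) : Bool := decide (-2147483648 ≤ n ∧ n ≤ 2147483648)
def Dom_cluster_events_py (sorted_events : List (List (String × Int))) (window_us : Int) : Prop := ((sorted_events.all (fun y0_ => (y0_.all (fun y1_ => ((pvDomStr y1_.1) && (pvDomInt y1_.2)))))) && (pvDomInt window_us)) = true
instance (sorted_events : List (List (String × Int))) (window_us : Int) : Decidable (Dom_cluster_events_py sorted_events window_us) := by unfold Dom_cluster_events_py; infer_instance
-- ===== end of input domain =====

-- B computes cut indices (where a consecutive gap exceeds the window) in a first phase and slices between consecutive cuts in a second, instead of A's fused accumulator scan; objective: alternative.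


-- ===== PORT A =====
-- ev["ts_mono_us"]: dict lookup, first match; the default 0 is never taken inside Pre_ (Python raises KeyError there).
def pvTs (ev : List (String × Int)) : Int :=
  ((PySem.Dict.mk ev).get? "ts_mono_us").getD 0

-- the `for ev in sorted_events[1:]` loop, state = (clusters, current_cluster); final length guard afterwards.
def pvClusterLoopA (window_us : Int) :
    List (List (String × Int)) → List (List (List (String × Int))) → List (List (String × Int)) →
    List (List (List (String × Int)))
  | [], clusters, cur => if 2 ≤ cur.length then clusters ++ [cur] else clusters
  | ev :: rest, clusters, cur =>
    if pvTs ev - pvTs ((PySem.List.pyGet? cur (-1)).getD []) ≤ window_us then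
      pvClusterLoopA window_us rest clusters (cur ++ [ev])
    else
      pvClusterLoopA window_us rest (if 2 ≤ cur.length then clusters ++ [cur] else clusters) [ev]

def cluster_events_py (sorted_events : List (List (String × Int))) (window_us : Int) : List (List (List (String × Int))) :=
  match sorted_events with
  | [] => []
  | e0 :: rest => pvClusterLoopA window_us rest [] [e0]

-- ===== PORT B =====
-- phase 1: cuts = [0] + [i for i in range(1, n) if ts[i] - ts[i-1] > window_us] + [n]
-- (indices i and i-1 are always in range, so the pyGetD default [] is never taken).
def pvCuts (sorted_events : List (List (String × Int))) (window_us : Int) : List Int :=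
  [0] ++ (PySem.List.pyRange 1 (sorted_events.length : Int) 1).filter
      (fun i => decide (window_us < pvTs (PySem.List.pyGetD sorted_events i []) - pvTs (PySem.List.pyGetD sorted_events (i - 1) []))) ++
    [(sorted_events.length : Int)]

-- phase 2: [sorted_events[a:b] for a, b in zip(cuts, cuts[1:]) if b - a >= 2]
def cluster_events_py_alt (sorted_events : List (List (String × Int))) (window_us : Int) : List (List (List (String × Int))) :=
  let cuts := pvCuts sorted_events window_us
  ((cuts.zip (PySem.List.slice cuts (some 1) none)).filter (fun ab => decide (2 ≤ ab.2 - ab.1))).map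
    (fun ab => PySem.List.slice sorted_events (some ab.1) (some ab.2))

-- ===== PRECONDITION & SPEC =====
-- Pre_ excludes exactly the inputs where Python A raises KeyError: two or more events and some event without key "ts_mono_us" (B raises there too).
def Pre_cluster_events_py (sorted_events : List (List (String × Int))) (window_us : Int) : Prop :=
  sorted_events.length ≤ 1 ∨ ∀ ev ∈ sorted_events, ((PySem.Dict.mk ev).get? "ts_mono_us").isSome
instance (sorted_events : List (List (String × Int))) (window_us : Int) : Decidable (Pre_cluster_events_py sorted_events window_us) := by unfold Pre_cluster_events_py; infer_instance

def pvWitness_cluster_events_py : (List (List (String × Int))) × Int :=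
  ([[("ts_mono_us", 0)], [("ts_mono_us", 3)], [("ts_mono_us", 100)]], 5)

def Spec_cluster_events_py (sorted_events : List (List (String × Int))) (window_us : Int) (out : List (List (List (String × Int)))) : Prop := out = cluster_events_py_alt sorted_events window_us
instance (sorted_events : List (List (String × Int))) (window_us : Int) (out : List (List (List (String × Int)))) : Decidable (Spec_cluster_events_py sorted_events window_us out) := by unfold Spec_cluster_events_py; infer_instance

-- ===== CLAIM (what is proved, stated in full; the proofs are below) =====
def Claim_equal_cluster_events_py : Prop := ∀ (sorted_events : List (List (String × Int))) (window_us : Int), Dom_cluster_events_py sorted_events window_us → Pre_cluster_events_py sorted_events window_us → Spec_cluster_events_py sorted_events window_us (cluster_events_py sorted_events window_us)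

-- ===== LEMMAS AND PROOFS =====

-- common reference shape: the list of ALL maximal adjacent runs, built back-to-front.
def pvChunksR (w : Int) : List (List (String × Int)) → List (List (List (String × Int)))
  | [] => []
  | [e] => [[e]]
  | e :: e' :: rest =>
    match pvChunksR w (e' :: rest) with
    | [] => [[e]]
    | c :: cs => if pvTs e' - pvTs e ≤ w then (e :: c) :: cs else [e] :: c :: cs

theorem pvChunksR_ne_nil (w : Int) (e : List (String × Int)) (l : List (List (String × Int))) :
    pvChunksR w (e :: l) ≠ [] := by
  cases l with
  | nil => simp [pvChunksR]
  | cons e' rest =>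
    simp only [pvChunksR]
    split
    · simp
    · split <;> simp

-- A-side: chunksFrom = A's loop without the filtering, front recursion with the current-run accumulator.
def pvChunksFrom (w : Int) (cur : List (List (String × Int))) : List (List (String × Int)) → List (List (List (String × Int)))
  | [] => [cur]
  | e :: rest =>
    if pvTs e - pvTs ((PySem.List.pyGet? cur (-1)).getD []) ≤ w then pvChunksFrom w (cur ++ [e]) rest
    else cur :: pvChunksFrom w [e] rest

-- filtering runs ++ [cur] = A's inline length guard on cur.
theorem pvFilterConcat (runs : List (List (List (String × Int)))) (cur : List (List (String × Int))) :
    (runs ++ [cur]).filter (fun run => decide (2 ≤ run.length)) =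
      if 2 ≤ cur.length then runs.filter (fun run => decide (2 ≤ run.length)) ++ [cur]
      else runs.filter (fun run => decide (2 ≤ run.length)) := by
  by_cases h2 : 2 ≤ cur.length <;> simp [List.filter_append, h2]

-- A's loop = filter (length ≥ 2) of (already-emitted runs ++ the runs still to be formed).
theorem pvLoopA_eq_chunksFrom (w : Int) (evs : List (List (String × Int))) :
    ∀ (runs : List (List (List (String × Int)))) (cur : List (List (String × Int))),
      pvClusterLoopA w evs (runs.filter (fun run => decide (2 ≤ run.length))) cur =
        (runs ++ pvChunksFrom w cur evs).filter (fun run => decide (2 ≤ run.length)) := by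
  induction evs with
  | nil =>
    intro runs cur
    simp only [pvClusterLoopA, pvChunksFrom]
    rw [pvFilterConcat]
  | cons e rest ih =>
    intro runs cur
    simp only [pvClusterLoopA, pvChunksFrom]
    by_cases h : pvTs e - pvTs ((PySem.List.pyGet? cur (-1)).getD []) ≤ w
    · rw [if_pos h, if_pos h]; exact ih runs (cur ++ [e])
    · rw [if_neg h, if_neg h, ← pvFilterConcat]
      have := ih (runs ++ [cur]) [e]
      simpa [List.append_assoc] using this

-- prepend pre to the first chunk.
def pvConsPre (pre : List (List (String × Int))) : List (List (List (String × Int))) → List (List (List (String × Int)))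
  | [] => [pre]
  | c :: cs => (pre ++ c) :: cs

-- bridge: the accumulator recursion equals the back-to-front recursion.
theorem pvChunksFrom_eq_chunksR (w : Int) :
    ∀ (l : List (List (String × Int))) (pre : List (List (String × Int))) (x : List (String × Int)),
      pvChunksFrom w (pre ++ [x]) l = pvConsPre pre (pvChunksR w (x :: l)) := by
  intro l
  induction l with
  | nil => intro pre x; simp [pvChunksFrom, pvChunksR, pvConsPre]
  | cons e rest ih =>
    intro pre x
    simp only [pvChunksFrom, PySem.List.pyGet?_neg_one_append_singleton, Option.getD_some]
    cases hc : pvChunksR w (e :: rest) with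
    | nil => exact absurd hc (pvChunksR_ne_nil w e rest)
    | cons c cs =>
      by_cases h : pvTs e - pvTs x ≤ w
      · rw [if_pos h]
        have h1 := ih (pre ++ [x]) e
        rw [hc] at h1
        simp only [pvChunksR, hc, if_pos h, pvConsPre] at h1 ⊢
        rw [h1]
        simp
      · rw [if_neg h]
        have h1 := ih [] e
        rw [hc] at h1
        simp only [List.nil_append] at h1
        simp only [pvChunksR, hc, if_neg h, pvConsPre]
        rw [h1]
        simp [pvConsPre]

-- Python xs[i] for positive i on a cons cell.
theorem pvGetD_cons_pos {α : Type} (x : α) (xs : List α) (i : Int) (d : α) (h : 0 < i) :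
    PySem.List.pyGetD (x :: xs) i d = PySem.List.pyGetD xs (i - 1) d := by
  obtain ⟨k, rfl⟩ : ∃ k : Nat, i = (k : Int) + 1 := ⟨(i - 1).toNat, by omega⟩
  show (PySem.List.pyGet? (x :: xs) ((k : Int) + 1)).getD d = _
  rw [PySem.List.pyGet?_cons_succ]
  simp

theorem pvRange_two_shift (n' : Int) : PySem.List.pyRange 2 (n' + 1) 1 = (PySem.List.pyRange 1 n' 1).map (· + 1) := by
  rw [PySem.List.pyRange_one, PySem.List.pyRange_one, List.map_map]
  have h : (n' + 1 - 2) = (n' - 1) := by ring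
  rw [h]
  apply List.map_congr_left
  intro k _
  simp; omega

-- B-side: cuts of e :: l' in terms of cuts of l' (inner comprehension, l' nonempty).
theorem pvInnerCuts_cons (w : Int) (e e' : List (String × Int)) (rest : List (List (String × Int))) :
    (PySem.List.pyRange 1 (((e :: e' :: rest).length : Int)) 1).filter
        (fun i => decide (w < pvTs (PySem.List.pyGetD (e :: e' :: rest) i []) - pvTs (PySem.List.pyGetD (e :: e' :: rest) (i - 1) []))) =
      (if w < pvTs e' - pvTs e then [(1 : Int)] else []) ++
        ((PySem.List.pyRange 1 (((e' :: rest).length : Int)) 1).filter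
          (fun i => decide (w < pvTs (PySem.List.pyGetD (e' :: rest) i []) - pvTs (PySem.List.pyGetD (e' :: rest) (i - 1) []))) ).map (· + 1) := by
  have hlen : (((e :: e' :: rest).length : Int)) = ((e' :: rest).length : Int) + 1 := by
    simp [List.length]
  rw [hlen]
  have hn' : (1 : Int) ≤ ((e' :: rest).length : Int) := by simp
  rw [PySem.List.pyRange_one_cons (by omega)]
  have h2 : (1 : Int) + 1 = 2 := by norm_num
  rw [h2, pvRange_two_shift, List.filter_cons, List.filter_map]
  have hhead : (decide (w < pvTs (PySem.List.pyGetD (e :: e' :: rest) 1 []) - pvTs (PySem.List.pyGetD (e :: e' :: rest) (1 - 1) []))) = decide (w < pvTs e' - pvTs e) := by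
    rw [pvGetD_cons_pos _ _ _ _ (by omega)]
    norm_num [PySem.List.pyGetD_zero_cons]
  rw [hhead]
  have hcong : ((PySem.List.pyRange 1 ((e' :: rest).length : Int) 1).filter
      ((fun i => decide (w < pvTs (PySem.List.pyGetD (e :: e' :: rest) i []) - pvTs (PySem.List.pyGetD (e :: e' :: rest) (i - 1) []))) ∘ (· + 1))) =
      (PySem.List.pyRange 1 ((e' :: rest).length : Int) 1).filter
      (fun i => decide (w < pvTs (PySem.List.pyGetD (e' :: rest) i []) - pvTs (PySem.List.pyGetD (e' :: rest) (i - 1) []))) := by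
    apply List.filter_congr
    intro i hi
    have hi1 : 1 ≤ i := (PySem.List.mem_pyRange_one.mp hi).1
    have e1 : PySem.List.pyGetD (e :: e' :: rest) (i + 1) [] = PySem.List.pyGetD (e' :: rest) i [] := by
      rw [pvGetD_cons_pos _ _ _ _ (by omega)]; norm_num
    have e2 : PySem.List.pyGetD (e :: e' :: rest) (i + 1 - 1) [] = PySem.List.pyGetD (e' :: rest) (i - 1) [] := by
      have hii : i + 1 - 1 = i := by ring
      rw [hii, pvGetD_cons_pos _ _ _ _ (by omega)]
    simp only [Function.comp, e1, e2]
  rw [hcong]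
  by_cases hg : w < pvTs e' - pvTs e <;> simp [hg]

-- every cut index is in [0, n].
theorem pvCuts_mem_bounds (l : List (List (String × Int))) (w : Int) :
    ∀ x ∈ pvCuts l w, 0 ≤ x ∧ x ≤ (l.length : Int) := by
  intro x hx
  simp only [pvCuts, List.mem_append, List.mem_singleton, List.mem_filter] at hx
  rcases hx with (hx | hx) | hx
  · omega
  · have := PySem.List.mem_pyRange_one.mp hx.1
    omega
  · omega

-- the slice/width pair of every shifted cut pair over e :: l is the pair over l.
theorem pvSlice_cons_shift (e : List (String × Int)) (l : List (List (String × Int))) (a b : Int)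
    (ha : 0 ≤ a) (hb : 0 ≤ b) :
    PySem.List.slice (e :: l) (some (a + 1)) (some (b + 1)) = PySem.List.slice l (some a) (some b) := by
  rw [PySem.List.slice_toNat, PySem.List.slice_toNat]
  case ha => omega
  case hb => omega
  case ha => omega
  case hb => omega
  have h1 : (a + 1).toNat = a.toNat + 1 := by omega
  have h2 : (b + 1).toNat = b.toNat + 1 := by omega
  rw [h1, h2, List.drop_succ_cons]
  congr 1
  omega

-- e is prepended to the first slice: xs[0 : b+1] on e :: l.
theorem pvSlice_cons_zero (e : List (String × Int)) (l : List (List (String × Int))) (b : Int) (hb : 0 ≤ b) :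
    PySem.List.slice (e :: l) (some 0) (some (b + 1)) = e :: PySem.List.slice l (some 0) (some b) := by
  rw [PySem.List.slice_toNat, PySem.List.slice_toNat]
  case ha => omega
  case hb => omega
  case ha => omega
  case hb => omega
  have h2 : (b + 1).toNat = b.toNat + 1 := by omega
  simp [h2]

-- every consecutive cut pair has nonnegative components.
theorem pvPairs_nonneg (l : List (List (String × Int))) (w : Int) :
    ∀ ab ∈ (pvCuts l w).zip (pvCuts l w).tail, 0 ≤ ab.1 ∧ 0 ≤ ab.2 := by
  intro ab hab
  obtain ⟨h1, h2⟩ := List.of_mem_zip hab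
  exact ⟨(pvCuts_mem_bounds l w _ h1).1, (pvCuts_mem_bounds l w _ (List.mem_of_mem_tail h2)).1⟩

-- shifting every cut pair by one while consing e onto the list leaves the slice/width pairs unchanged.
theorem pvMapShift (e : List (String × Int)) (l' : List (List (String × Int))) (P : List (Int × Int))
    (hmem : ∀ ab ∈ P, 0 ≤ ab.1 ∧ 0 ≤ ab.2) :
    P.map ((fun ab : Int × Int => (PySem.List.slice (e :: l') (some ab.1) (some ab.2), ab.2 - ab.1)) ∘ (Prod.map (· + 1) (· + 1))) =
      P.map (fun ab : Int × Int => (PySem.List.slice l' (some ab.1) (some ab.2), ab.2 - ab.1)) := by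
  apply List.map_congr_left
  intro ab hab
  obtain ⟨h1, h2⟩ := hmem ab hab
  simp only [Function.comp, Prod.map]
  rw [pvSlice_cons_shift _ _ _ _ h1 h2]
  congr 1
  ring

-- the main B-side characterisation: pairs (slice, width) over consecutive cuts = chunks tagged with their length.
theorem pvPairs_eq_chunks (w : Int) :
    ∀ (l : List (List (String × Int))), l ≠ [] →
      ((pvCuts l w).zip (pvCuts l w).tail).map
          (fun ab => (PySem.List.slice l (some ab.1) (some ab.2), ab.2 - ab.1)) =
        (pvChunksR w l).map (fun c => (c, (c.length : Int))) := by
  intro l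
  induction l with
  | nil => intro h; exact absurd rfl h
  | cons e tail ih =>
    intro _
    cases tail with
    | nil =>
      have h1 : pvCuts [e] w = [0, 1] := by
        simp [pvCuts, PySem.List.pyRange_one_eq_nil]
      rw [h1]
      have h2 : PySem.List.slice [e] (some (0 : Int)) (some (1 : Int)) = [e] := by
        rw [PySem.List.slice_toNat] <;> simp
      simp [pvChunksR, h2]
    | cons e' rest =>
      -- notation
      have hT : pvCuts (e' :: rest) w =
          0 :: ((PySem.List.pyRange 1 (((e' :: rest).length : Int)) 1).filter
            (fun i => decide (w < pvTs (PySem.List.pyGetD (e' :: rest) i []) - pvTs (PySem.List.pyGetD (e' :: rest) (i - 1) []))) ++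
            [((e' :: rest).length : Int)]) := by
        simp [pvCuts]
      set T := (PySem.List.pyRange 1 (((e' :: rest).length : Int)) 1).filter
            (fun i => decide (w < pvTs (PySem.List.pyGetD (e' :: rest) i []) - pvTs (PySem.List.pyGetD (e' :: rest) (i - 1) []))) ++
            [((e' :: rest).length : Int)] with hTdef
      have hcuts : pvCuts (e :: e' :: rest) w =
          0 :: ((if w < pvTs e' - pvTs e then [(1 : Int)] else []) ++ T.map (· + 1)) := by
        simp only [pvCuts, pvInnerCuts_cons w e e' rest, hTdef, List.map_append, List.map_cons, List.map_nil]
        have hlen : (((e :: e' :: rest).length : Int)) = ((e' :: rest).length : Int) + 1 := by simp [List.length]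
        rw [hlen]
        simp [List.append_assoc]
      have hne' : (e' :: rest) ≠ ([] : List (List (String × Int))) := by simp
      have hpairs' := ih hne'
      rw [hT] at hpairs'
      cases hcR : pvChunksR w (e' :: rest) with
      | nil => exact absurd hcR (pvChunksR_ne_nil w e' rest)
      | cons c cs =>
      rw [hcR] at hpairs'
      by_cases hg : w < pvTs e' - pvTs e
      · -- gap: first cluster of the tail is not extended; [e] becomes its own (later dropped) run
        rw [hcuts, if_pos hg]
        have hz : (0 :: ([(1 : Int)] ++ T.map (· + 1))).zip (0 :: ([(1 : Int)] ++ T.map (· + 1))).tail =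
            (0, 1) :: ((0 :: T).map (· + 1)).zip (T.map (· + 1)) := by
          simp [List.zip_cons_cons]
        rw [hz, List.map_cons, List.zip_map, List.map_map]
        have hmem : ∀ ab ∈ (0 :: T).zip T, 0 ≤ ab.1 ∧ 0 ≤ ab.2 := by
          intro ab hab
          have := pvPairs_nonneg (e' :: rest) w ab (by rw [hT]; exact hab)
          exact this
        have hchunks : pvChunksR w (e :: e' :: rest) = [e] :: c :: cs := by
          simp only [pvChunksR, hcR]
          rw [if_neg (by omega)]
        simp only [List.tail_cons] at hpairs'
        rw [pvMapShift e (e' :: rest) _ hmem, hpairs', hchunks, List.map_cons]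
        congr 1
      · -- no gap: e joins the first cluster of the tail
        rw [hcuts, if_neg hg]
        obtain ⟨t1, T2, hTeq⟩ : ∃ t1 T2, T = t1 :: T2 := by
          cases hTcase : T with
          | nil => exact absurd (hTdef ▸ hTcase) (by simp)
          | cons a b => exact ⟨a, b, rfl⟩
        rw [hTeq]
        have hz : (0 :: ([] ++ (t1 :: T2).map (· + 1))).zip (0 :: ([] ++ (t1 :: T2).map (· + 1))).tail =
            (0, t1 + 1) :: ((t1 :: T2).map (· + 1)).zip (T2.map (· + 1)) := by
          simp [List.zip_cons_cons]
        rw [hz, List.map_cons, List.zip_map, List.map_map]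
        rw [hTeq] at hpairs'
        have hz' : (0 :: t1 :: T2).zip (0 :: t1 :: T2).tail = (0, t1) :: (t1 :: T2).zip T2 := by
          simp [List.zip_cons_cons]
        rw [hz', List.map_cons] at hpairs'
        have hhead := (List.cons.injEq _ _ _ _).mp hpairs' |>.1
        have hrest := (List.cons.injEq _ _ _ _).mp hpairs' |>.2
        have hsl : PySem.List.slice (e' :: rest) (some (0 : Int)) (some t1) = c := (Prod.mk.injEq _ _ _ _).mp hhead |>.1
        have ht1 : t1 - 0 = (c.length : Int) := (Prod.mk.injEq _ _ _ _).mp hhead |>.2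
        have ht1' : t1 = (c.length : Int) := by omega
        have ht1nn : 0 ≤ t1 := by omega
        have hmem : ∀ ab ∈ (t1 :: T2).zip T2, 0 ≤ ab.1 ∧ 0 ≤ ab.2 := by
          intro ab hab
          apply pvPairs_nonneg (e' :: rest) w ab
          rw [hT, hTeq]
          show ab ∈ (0 :: t1 :: T2).zip (0 :: t1 :: T2).tail
          rw [hz']
          exact List.mem_cons_of_mem _ hab
        have hchunks : pvChunksR w (e :: e' :: rest) = (e :: c) :: cs := by
          simp only [pvChunksR, hcR]
          rw [if_pos (by omega)]
        have hfirst : PySem.List.slice (e :: e' :: rest) (some (0 : Int)) (some (t1 + 1)) = e :: c := by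
          rw [pvSlice_cons_zero _ _ _ ht1nn, hsl]
        rw [pvMapShift e (e' :: rest) _ hmem, hrest, hchunks, List.map_cons]
        congr 1
        show (PySem.List.slice (e :: e' :: rest) (some (0 : Int)) (some (t1 + 1)), (t1 + 1) - 0) =
          (e :: c, ((e :: c).length : Int))
        rw [hfirst]
        simp only [List.length_cons, Prod.mk.injEq]
        refine ⟨trivial, ?_⟩
        push_cast
        omega

-- B = filter (length ≥ 2) of the chunks.
theorem pvAlt_eq_filter_chunksR (l : List (List (String × Int))) (w : Int) :
    cluster_events_py_alt l w = (pvChunksR w l).filter (fun run => decide (2 ≤ run.length)) := by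
  cases l with
  | nil =>
    show ((((pvCuts [] w).zip (PySem.List.slice (pvCuts [] w) (some 1) none)).filter
        (fun ab => decide (2 ≤ ab.2 - ab.1))).map
        (fun ab => PySem.List.slice ([] : List (List (String × Int))) (some ab.1) (some ab.2))) = _
    have h0 : pvCuts ([] : List (List (String × Int))) w = [0, 0] := by
      simp [pvCuts, PySem.List.pyRange_one_eq_nil]
    rw [h0, PySem.List.slice_from_one]
    simp [pvChunksR]
  | cons e tail =>
    have hP := pvPairs_eq_chunks w (e :: tail) (by simp)
    show ((((pvCuts (e :: tail) w).zip (PySem.List.slice (pvCuts (e :: tail) w) (some 1) none)).filter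
        (fun ab => decide (2 ≤ ab.2 - ab.1))).map
        (fun ab => PySem.List.slice (e :: tail) (some ab.1) (some ab.2))) = _
    rw [PySem.List.slice_from_one]
    have key :
        (((pvCuts (e :: tail) w).zip (pvCuts (e :: tail) w).tail).filter (fun ab => decide (2 ≤ ab.2 - ab.1))).map
            (fun ab => PySem.List.slice (e :: tail) (some ab.1) (some ab.2)) =
          ((((pvCuts (e :: tail) w).zip (pvCuts (e :: tail) w).tail).map
              (fun ab => (PySem.List.slice (e :: tail) (some ab.1) (some ab.2), ab.2 - ab.1))).filter
            (fun p => decide (2 ≤ p.2))).map Prod.fst := by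
      rw [List.filter_map, List.map_map]
      rfl
    rw [key, hP, List.filter_map, List.map_map]
    have hq : ((fun p : (List (List (String × Int))) × Int => decide (2 ≤ p.2)) ∘
        (fun c : List (List (String × Int)) => (c, (c.length : Int)))) = fun c => decide (2 ≤ c.length) := by
      funext c
      simp only [Function.comp]
      apply decide_eq_decide.mpr
      omega
    have hid : (Prod.fst ∘ (fun c : List (List (String × Int)) => (c, (c.length : Int)))) = id := by
      funext c; rfl
    rw [hq, hid, List.map_id]

-- ===== VERDICT (by name: the statement is the Claim_ definition above) =====
theorem cluster_events_py_spec : Claim_equal_cluster_events_py := by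
  intro sorted_events w _ _
  unfold Spec_cluster_events_py
  rw [pvAlt_eq_filter_chunksR]
  match sorted_events with
  | [] => rfl
  | e0 :: rest =>
    have h := pvLoopA_eq_chunksFrom w rest [] [e0]
    simp only [List.filter_nil, List.nil_append] at h
    have hb := pvChunksFrom_eq_chunksR w rest [] e0
    simp only [List.nil_append] at hb
    rw [cluster_events_py, h, hb]
    cases hc : pvChunksR w (e0 :: rest) with
    | nil => exact absurd hc (pvChunksR_ne_nil w e0 rest)
    | cons c cs => simp [pvConsPre]
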